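-- pv_equiv track=rewrite | github.com/bds01088/Algorithm | 1979_어디에단어가들어갈수있을까/solution.py | canwordIn
-- ===== SOURCE A (Python) =====
-- def canwordIn(n, k, board):
--     result = 0
--     for i in range(n):
--         rcnt = 0
--         ccnt = 0
--         for j in range(n):
--             if board[i][j] == 1 :
--                 rcnt += 1
--                 if rcnt == k :
--                     if j+1 < n and board[i][j+1] == 0:
--                         result += 1
--                     elif j+1 == n:
--                         result += 1
--             else :
--                 rcnt = 0
--
--             if board[j][i] == 1 :
--                 ccnt += 1
--                 if ccnt == k :
--                     if j+1 < n and board[j+1][i] == 0: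
--                         result += 1
--                     elif j+1 == n :
--                         result += 1
--             else :
--                 ccnt = 0
--     return result
-- ===== SOURCE B (Python) =====
-- def canwordIn(n, k, board):
--     size = max(n, 0)
--
--     def runs(line):
--         gs = []
--         for v in line:
--             if gs and gs[-1][0] == v:
--                 gs[-1][1] += 1
--             else:
--                 gs.append([v, 1])
--         return gs
--
--     def slots(line):
--         gs = runs(line)
--         total = 0
--         for idx in range(len(gs)):
--             v, length = gs[idx]
--             nxt = gs[idx + 1][0] if idx + 1 < len(gs) else 0
--             if v == 1 and length == k and nxt == 0:
--                 total += 1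
--         return total
--
--     rows = [board[i][:size] for i in range(size)]
--     cols = [[row[i] for row in rows] for i in range(size)]
--     return sum(slots(r) for r in rows) + sum(slots(c) for c in cols)
-- ===== Notes on version B (the rewrite author's own statement) =====
-- stated objective: simpler
-- what changed: B replaces A's interleaved incremental counters with next-cell lookahead by a group-and-count decomposition: it run-length-encodes each row and each extracted column and counts runs of 1s of length exactly k followed by a 0 or the border.
import Mathlib
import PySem

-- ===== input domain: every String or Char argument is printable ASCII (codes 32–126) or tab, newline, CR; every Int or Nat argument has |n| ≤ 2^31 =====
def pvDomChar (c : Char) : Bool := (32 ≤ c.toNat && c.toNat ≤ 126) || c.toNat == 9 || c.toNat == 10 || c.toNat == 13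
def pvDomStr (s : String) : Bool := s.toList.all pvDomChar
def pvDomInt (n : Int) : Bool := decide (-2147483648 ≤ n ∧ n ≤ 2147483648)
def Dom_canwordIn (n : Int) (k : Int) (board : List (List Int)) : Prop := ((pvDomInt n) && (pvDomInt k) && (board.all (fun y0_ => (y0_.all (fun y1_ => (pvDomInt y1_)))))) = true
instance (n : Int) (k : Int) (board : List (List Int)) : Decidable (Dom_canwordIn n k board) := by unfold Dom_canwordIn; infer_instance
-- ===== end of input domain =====

-- B counts word slots by run-length-encoding each row/column and counting runs of 1s of
-- length exactly k that are followed by 0 or the border (objective: simpler decomposition;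
-- equivalence proved on the return value on Pre_, where A raises no IndexError).

-- ===== PORT A =====
-- board[i][j]; in-range under Pre_, so the defaults are never used there
def pvCell (board : List (List Int)) (i j : Int) : Int :=
  PySem.List.pyGetD (PySem.List.pyGetD board i []) j 0

def pvStepA (n k : Int) (board : List (List Int)) (i : Int)
    (st : Int × Int × Int) (j : Int) : Int × Int × Int :=
  let rcnt := st.1
  let ccnt := st.2.1
  let res := st.2.2
  let rr : Int × Int :=
    if pvCell board i j = 1 then
      let rcnt := rcnt + 1
      let res :=
        if rcnt = k then
          (if j + 1 < n ∧ pvCell board i (j + 1) = 0 then res + 1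
           else if j + 1 = n then res + 1 else res)
        else res
      (rcnt, res)
    else (0, res)
  let cc : Int × Int :=
    if pvCell board j i = 1 then
      let ccnt := ccnt + 1
      let res :=
        if ccnt = k then
          (if j + 1 < n ∧ pvCell board (j + 1) i = 0 then rr.2 + 1
           else if j + 1 = n then rr.2 + 1 else rr.2)
        else rr.2
      (ccnt, res)
    else (0, rr.2)
  (rr.1, cc.1, cc.2)

def canwordIn (n : Int) (k : Int) (board : List (List Int)) : Int :=
  (PySem.List.pyRange 0 n 1).foldl (fun result i =>
    ((PySem.List.pyRange 0 n 1).foldl (pvStepA n k board i) (0, 0, result)).2.2) 0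

-- ===== PORT B =====
-- run-length encoding: the loop body of Source B's `runs`
def pvRunsStep (gs : List (Int × Int)) (v : Int) : List (Int × Int) :=
  match gs.getLast? with
  | some (w, c) => if w = v then gs.dropLast ++ [(w, c + 1)] else gs ++ [(v, 1)]
  | none => [(v, 1)]

def pvRuns (line : List Int) : List (Int × Int) := line.foldl pvRunsStep []

-- Source B's `slots` index loop with its next-group lookahead (end of list reads as 0)
def pvNextVal : List (Int × Int) → Int
  | [] => 0
  | (w, _) :: _ => w

def pvSlotsGo (k : Int) : List (Int × Int) → Int
  | [] => 0
  | (v, c) :: t =>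
    (if v = 1 ∧ c = k ∧ pvNextVal t = 0 then 1 else 0) + pvSlotsGo k t

def pvSlots (k : Int) (line : List Int) : Int := pvSlotsGo k (pvRuns line)

def canwordIn_alt (n : Int) (k : Int) (board : List (List Int)) : Int :=
  let size := max n 0
  let rows := (PySem.List.pyRange 0 size 1).map
    (fun i => PySem.List.slice (PySem.List.pyGetD board i []) none (some size))
  let cols := (PySem.List.pyRange 0 size 1).map
    (fun i => rows.map (fun row => PySem.List.pyGetD row i 0))
  (rows.map (pvSlots k)).sum + (cols.map (pvSlots k)).sum

-- ===== PRECONDITION & SPEC =====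
-- exactly where A raises no IndexError: the first n rows exist and have length ≥ n
def Pre_canwordIn (n : Int) (k : Int) (board : List (List Int)) : Prop :=
  n ≤ (board.length : Int) ∧ ∀ r ∈ board.take n.toNat, n ≤ (r.length : Int)

instance (n : Int) (k : Int) (board : List (List Int)) : Decidable (Pre_canwordIn n k board) := by
  unfold Pre_canwordIn; infer_instance

def pvWitness_canwordIn : Int × Int × List (List Int) := (2, 1, [[1, 0], [0, 1]])

def Spec_canwordIn (n : Int) (k : Int) (board : List (List Int)) (out : Int) : Prop :=
  out = canwordIn_alt n k board
instance (n : Int) (k : Int) (board : List (List Int)) (out : Int) : Decidable (Spec_canwordIn n k board out) := by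
  unfold Spec_canwordIn; infer_instance

-- ===== CLAIM (what is proved, stated in full; the proofs are below) =====
def Claim_equal_canwordIn : Prop := ∀ (n : Int) (k : Int) (board : List (List Int)), Dom_canwordIn n k board → Pre_canwordIn n k board → Spec_canwordIn n k board (canwordIn n k board)

-- ===== LEMMAS AND PROOFS =====

-- incremental scan with lookahead: what A's inner loop computes on one line
def pvEndOk : List Int → Bool
  | [] => true
  | y :: _ => decide (y = 0)

def scanA (k rcnt : Int) : List Int → Int
  | [] => 0
  | x :: rest =>
    if x = 1 then
      (if rcnt + 1 = k ∧ pvEndOk rest = true then 1 else 0) + scanA k (rcnt + 1) rest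
    else scanA k 0 rest

-- run-length encoding with an open first group (v, c)
def pvCr (v c : Int) : List Int → List (Int × Int)
  | [] => [(v, c)]
  | x :: xs => if x = v then pvCr v (c + 1) xs else (v, c) :: pvCr x 1 xs

def pvExtra (k c : Int) (l : List Int) : Int :=
  if c = k ∧ pvEndOk l = true then 1 else 0

theorem pvNextVal_pvCr (l : List Int) : ∀ v c, pvNextVal (pvCr v c l) = v := by
  induction l with
  | nil => intro v c; rfl
  | cons x xs ih =>
    intro v c
    by_cases h : x = v
    · simp [pvCr, h, ih]
    · simp [pvCr, h, pvNextVal]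

theorem pvSlotsGo_pvCr (k : Int) (l : List Int) :
    (∀ c, pvSlotsGo k (pvCr 1 c l) = scanA k c l + pvExtra k c l)
    ∧ (∀ v c, v ≠ 1 → pvSlotsGo k (pvCr v c l) = scanA k 0 l) := by
  induction l with
  | nil =>
    constructor
    · intro c
      simp [pvCr, pvSlotsGo, pvNextVal, scanA, pvExtra, pvEndOk]
    · intro v c hv
      simp [pvCr, pvSlotsGo, pvNextVal, hv, scanA]
  | cons x xs ih =>
    constructor
    · intro c
      by_cases h : x = 1
      · subst h
        rw [pvCr, if_pos rfl, ih.1 (c + 1)]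
        simp only [scanA, if_pos rfl, pvExtra, pvEndOk]
        simp only [decide_eq_true_eq]
        ring_nf
        by_cases hk : c + 1 = k <;> simp [hk] <;> ring
      · rw [pvCr, if_neg h]
        rw [pvSlotsGo, pvNextVal_pvCr, ih.2 x 1 h]
        simp only [scanA, if_neg h, pvExtra, pvEndOk]
        simp only [decide_eq_true_eq]
        ring_nf
        by_cases hk : c = k <;> simp [hk] <;> ring
    · intro v c hv
      by_cases h : x = v
      · subst h
        rw [pvCr, if_pos rfl, ih.2 x (c + 1) hv]
        simp [scanA, hv]
      · rw [pvCr, if_neg h, pvSlotsGo, pvNextVal_pvCr]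
        by_cases hx : x = 1
        · subst hx
          rw [ih.1 1]
          simp only [scanA, if_pos rfl, pvExtra, hv]
          norm_num
          ring
        · rw [ih.2 x 1 hx]
          simp [scanA, hx, hv]

theorem pvRuns_foldl (l : List Int) :
    ∀ (acc : List (Int × Int)) (v c : Int),
      List.foldl pvRunsStep (acc ++ [(v, c)]) l = acc ++ pvCr v c l := by
  induction l with
  | nil => intro acc v c; rfl
  | cons x xs ih =>
    intro acc v c
    by_cases h : x = v
    · have hstep : pvRunsStep (acc ++ [(v, c)]) x = acc ++ [(v, c + 1)] := by
        simp [pvRunsStep, h]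
      rw [List.foldl_cons, hstep, ih, pvCr, if_pos h]
    · have hstep : pvRunsStep (acc ++ [(v, c)]) x = (acc ++ [(v, c)]) ++ [(x, 1)] := by
        simp [pvRunsStep]
        intro he; exact absurd he.symm h
      rw [List.foldl_cons, hstep, ih, pvCr, if_neg h]
      simp

theorem pvSlots_eq_scanA (k : Int) (l : List Int) : pvSlots k l = scanA k 0 l := by
  cases l with
  | nil => rfl
  | cons x xs =>
    have hruns : pvRuns (x :: xs) = pvCr x 1 xs := by
      have h0 : pvRunsStep [] x = [] ++ [(x, 1)] := rfl
      rw [pvRuns, List.foldl_cons, h0, pvRuns_foldl]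
      simp
    rw [pvSlots, hruns]
    by_cases hx : x = 1
    · subst hx
      rw [(pvSlotsGo_pvCr k xs).1 1]
      simp only [scanA, if_pos rfl, pvExtra]
      norm_num
      ring
    · rw [(pvSlotsGo_pvCr k xs).2 x 1 hx]
      simp [scanA, hx]

-- the row / column lines A's loops read
def pvRowL (board : List (List Int)) (n i : Int) : List Int :=
  (List.range n.toNat).map (fun j : Nat => pvCell board i (j : Int))

def pvColL (board : List (List Int)) (n i : Int) : List Int :=
  (List.range n.toNat).map (fun j : Nat => pvCell board (j : Int) i)

theorem pvEndOk_drop (f : Nat → Int) (N j : Nat) (hj : j ≤ N) :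
    pvEndOk (((List.range N).map f).drop j) = true ↔ (j < N ∧ f j = 0) ∨ j = N := by
  rcases Nat.lt_or_ge j N with h | h
  · rw [List.drop_eq_getElem_cons (by simpa using h)]
    simp [pvEndOk, h]
    omega
  · have hjN : j = N := by omega
    subst hjN
    rw [List.drop_eq_nil_iff.mpr (by simp)]
    simp [pvEndOk]

theorem pvStepA_eq (n k : Int) (board : List (List Int)) (i : Int) (hn : 0 ≤ n)
    (jn : Nat) (hlt : jn < n.toNat) (rc cc res : Int) :
    pvStepA n k board i (rc, cc, res) (jn : Int)
      = (if pvCell board i (jn : Int) = 1 then rc + 1 else 0,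
         if pvCell board (jn : Int) i = 1 then cc + 1 else 0,
         res
          + (if pvCell board i (jn : Int) = 1 ∧ rc + 1 = k ∧
                pvEndOk ((pvRowL board n i).drop (jn + 1)) = true then 1 else 0)
          + (if pvCell board (jn : Int) i = 1 ∧ cc + 1 = k ∧
                pvEndOk ((pvColL board n i).drop (jn + 1)) = true then 1 else 0)) := by
  have hR : pvEndOk ((pvRowL board n i).drop (jn + 1)) = true ↔
      (((jn : Int) + 1 < n ∧ pvCell board i ((jn : Int) + 1) = 0) ∨ (jn : Int) + 1 = n) := by
    rw [pvRowL, pvEndOk_drop _ _ _ (by omega)]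
    constructor
    · rintro (⟨h1, h2⟩ | h1)
      · exact Or.inl ⟨by omega, by push_cast at h2 ⊢; exact h2⟩
      · exact Or.inr (by omega)
    · rintro (⟨h1, h2⟩ | h1)
      · exact Or.inl ⟨by omega, by push_cast at h2 ⊢; exact h2⟩
      · exact Or.inr (by omega)
  have hC : pvEndOk ((pvColL board n i).drop (jn + 1)) = true ↔
      (((jn : Int) + 1 < n ∧ pvCell board ((jn : Int) + 1) i = 0) ∨ (jn : Int) + 1 = n) := by
    rw [pvColL, pvEndOk_drop _ _ _ (by omega)]
    constructor
    · rintro (⟨h1, h2⟩ | h1)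
      · exact Or.inl ⟨by omega, by push_cast at h2 ⊢; exact h2⟩
      · exact Or.inr (by omega)
    · rintro (⟨h1, h2⟩ | h1)
      · exact Or.inl ⟨by omega, by push_cast at h2 ⊢; exact h2⟩
      · exact Or.inr (by omega)
  simp only [pvStepA]
  by_cases h1 : pvCell board i (jn : Int) = 1 <;>
  by_cases h2 : rc + 1 = k <;>
  by_cases h4 : pvCell board (jn : Int) i = 1 <;>
  by_cases h5 : cc + 1 = k <;>
  by_cases hre : pvEndOk ((pvRowL board n i).drop (jn + 1)) = true <;>
  by_cases hce : pvEndOk ((pvColL board n i).drop (jn + 1)) = true <;>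
    simp only [h1, h2, h4, h5, if_true, if_false] <;>
    rw [hR] at hre <;> rw [hC] at hce <;>
    simp [h1, h2, h4, h5, hre, hce] <;>
    (try constructor) <;> (try split_ifs) <;> simp_all <;> omega

theorem pvInnerA (n k : Int) (board : List (List Int)) (i : Int) (hn : 0 ≤ n) :
    ∀ (m jn : Nat), jn + m = n.toNat → ∀ (rc cc res : Int),
      ((PySem.List.pyRange (jn : Int) n 1).foldl (pvStepA n k board i) (rc, cc, res)).2.2
        = res + scanA k rc ((pvRowL board n i).drop jn)
            + scanA k cc ((pvColL board n i).drop jn) := by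
  intro m
  induction m with
  | zero =>
    intro jn hjn rc cc res
    have hjI : n ≤ (jn : Int) := by omega
    rw [PySem.List.pyRange_one_eq_nil hjI]
    rw [List.drop_eq_nil_iff.mpr (by simp [pvRowL]; omega),
        List.drop_eq_nil_iff.mpr (by simp [pvColL]; omega)]
    simp [scanA]
  | succ m ihm =>
    intro jn hjn rc cc res
    have hlt : jn < n.toNat := by omega
    have hltI : (jn : Int) < n := by omega
    rw [PySem.List.pyRange_one_cons hltI, List.foldl_cons,
        pvStepA_eq n k board i hn jn hlt rc cc res]
    have hcast : ((jn : Int) + 1) = ((jn + 1 : Nat) : Int) := by push_cast; ring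
    rw [hcast, ihm (jn + 1) (by omega)]
    have hRd : (pvRowL board n i).drop jn
        = pvCell board i (jn : Int) :: (pvRowL board n i).drop (jn + 1) := by
      rw [List.drop_eq_getElem_cons (by simpa [pvRowL] using hlt)]
      simp [pvRowL]
    have hCd : (pvColL board n i).drop jn
        = pvCell board (jn : Int) i :: (pvColL board n i).drop (jn + 1) := by
      rw [List.drop_eq_getElem_cons (by simpa [pvColL] using hlt)]
      simp [pvColL]
    rw [hRd, hCd]
    simp only [scanA]
    by_cases h1 : pvCell board i (jn : Int) = 1 <;>
    by_cases h2 : rc + 1 = k <;>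
    by_cases h4 : pvCell board (jn : Int) i = 1 <;>
    by_cases h5 : cc + 1 = k <;>
    by_cases hre : pvEndOk ((pvRowL board n i).drop (jn + 1)) = true <;>
    by_cases hce : pvEndOk ((pvColL board n i).drop (jn + 1)) = true <;>
      simp [h1, h2, h4, h5, hre, hce] <;> ring

theorem pvA_sum (n k : Int) (board : List (List Int)) :
    canwordIn n k board
      = ((List.range n.toNat).map
          (fun i : Nat => scanA k 0 (pvRowL board n (i : Int))
                  + scanA k 0 (pvColL board n (i : Int)))).sum := by
  by_cases hn0 : n ≤ 0
  · have h1 : PySem.List.pyRange 0 n 1 = [] := PySem.List.pyRange_one_eq_nil (by omega)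
    have h2 : n.toNat = 0 := by omega
    simp [canwordIn, h1, h2]
  · have hn : 0 ≤ n := by omega
    have key : ∀ (res i : Int),
        ((PySem.List.pyRange 0 n 1).foldl (pvStepA n k board i) (0, 0, res)).2.2
          = res + (scanA k 0 (pvRowL board n i) + scanA k 0 (pvColL board n i)) := by
      intro res i
      have h := pvInnerA n k board i hn n.toNat 0 (by omega) 0 0 res
      simpa [add_assoc] using h
    unfold canwordIn
    rw [PySem.List.foldl_congr_mem _
      (g := fun (res i : Int) => res + (scanA k 0 (pvRowL board n i) + scanA k 0 (pvColL board n i)))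
      (h := fun acc x _ => key acc x)]
    rw [PySem.List.foldl_add]
    rw [PySem.List.pyRange_one]
    simp only [List.map_map, zero_add]
    have hfe : ((fun i : Int => scanA k 0 (pvRowL board n i) + scanA k 0 (pvColL board n i))
        ∘ fun (t : Nat) => (t : Int))
        = fun t : Nat => scanA k 0 (pvRowL board n (t : Int)) + scanA k 0 (pvColL board n (t : Int)) := by
      funext t; simp
    rw [hfe]
    norm_num

theorem pvB_sum (n k : Int) (board : List (List Int)) (h : Pre_canwordIn n k board) :
    canwordIn_alt n k board
      = ((List.range n.toNat).map (fun i : Nat => scanA k 0 (pvRowL board n (i : Int)))).sum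
      + ((List.range n.toNat).map (fun i : Nat => scanA k 0 (pvColL board n (i : Int)))).sum := by
  obtain ⟨hlen, hrows⟩ := h
  by_cases hn0 : n ≤ 0
  · have hsz : max n 0 = 0 := by omega
    have h2 : n.toNat = 0 := by omega
    simp [canwordIn_alt, hsz, h2, PySem.List.pyRange_one_eq_nil le_rfl]
  · have hn : 0 ≤ n := by omega
    have hsz : max n 0 = n := by omega
    have hrow : ∀ t : Nat, t < n.toNat →
        PySem.List.slice (PySem.List.pyGetD board (t : Int) []) none (some n)
          = pvRowL board n (t : Int) := by
      intro t ht
      have htb : t < board.length := by omega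
      have hbd : PySem.List.pyGetD board (t : Int) [] = board[t] := by
        rw [PySem.List.pyGetD_natCast]
        exact List.getD_eq_getElem board [] htb
      have hmem : board[t] ∈ board.take n.toNat := by
        have h1 : t < (board.take n.toNat).length := by simp; omega
        have h2 : (board.take n.toNat)[t] = board[t] := List.getElem_take
        rw [← h2]
        exact List.getElem_mem h1
      have hrlen : n.toNat ≤ board[t].length := by
        have := hrows board[t] hmem
        omega
      rw [hbd, PySem.List.slice_to _ hn]
      apply List.ext_getElem
      · simp [pvRowL]; omega
      · intro i h1 h2
        simp only [pvRowL, List.getElem_take, List.getElem_map, List.getElem_range, pvCell]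
        rw [hbd, PySem.List.pyGetD_natCast]
        exact (List.getD_eq_getElem board[t] 0 (by simp [pvRowL] at h2; omega)).symm
    have hcol : ∀ t : Nat, t < n.toNat →
        ((List.range n.toNat).map (fun j : Nat => pvRowL board n (j : Int))).map
            (fun row => PySem.List.pyGetD row (t : Int) 0)
          = pvColL board n (t : Int) := by
      intro t ht
      rw [List.map_map, pvColL]
      apply List.map_congr_left
      intro j hj
      simp only [List.mem_range] at hj
      simp only [Function.comp]
      rw [PySem.List.pyGetD_natCast]
      rw [List.getD_eq_getElem (pvRowL board n (j : Int)) 0 (by simp [pvRowL]; omega)]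
      simp [pvRowL]
    unfold canwordIn_alt
    simp only [hsz]
    rw [PySem.List.pyRange_one]
    norm_num
    have hmid : List.map ((fun i : Int => PySem.List.slice (PySem.List.pyGetD board i []) none (some n))
          ∘ fun (t : Nat) => (t : Int)) (List.range n.toNat)
        = List.map (fun j : Nat => pvRowL board n (j : Int)) (List.range n.toNat) := by
      apply List.map_congr_left
      intro b hb
      simp only [Function.comp_apply]
      exact hrow b (List.mem_range.mp hb)
    congr 1
    · apply congrArg List.sum
      rw [← List.map_map, hmid, List.map_map]
      apply List.map_congr_left
      intro a ha
      simp only [Function.comp_apply]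
      rw [pvSlots_eq_scanA]
    · apply congrArg List.sum
      apply List.map_congr_left
      intro a ha
      simp only [Function.comp_apply]
      rw [← List.map_map, hmid, hcol a (List.mem_range.mp ha), pvSlots_eq_scanA]

-- ===== VERDICT (by name: the statement is the Claim_ definition above) =====
theorem canwordIn_spec : Claim_equal_canwordIn := by
  intro n k board _ hpre
  unfold Spec_canwordIn
  rw [pvA_sum, pvB_sum n k board hpre]
  exact List.sum_map_add
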